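-- pv_equiv track=rewrite | github.com/wzygxr/shuati | class139_LinearBasisAlgorithms/Code03_Elements.py | compute
-- ===== SOURCE A (Python) =====
-- def insert(num, basis, BIT):
--     """
--     线性基里插入num，如果线性基增加了返回true，否则返回false
--
--     参数:
--         num: 要插入的数字
--         basis: 线性基数组
--         BIT: 最大位数
--
--     返回:
--         bool: 插入是否成功
--     """
--     for i in range(BIT, -1, -1):
--         if (num >> i) & 1:
--             if basis[i] == 0:
--                 basis[i] = num
--                 return True
--             num ^= basis[i]
--     return False
--
-- def compute(elements, BIT):
--     """
--     计算最大魔力和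
--
--     算法思路：
--     1. 将所有矿石按魔力值从大到小排序
--     2. 清空线性基
--     3. 贪心选择矿石：依次尝试将每个矿石加入线性基，如果能成功加入则将该矿石的魔力加入答案
--
--     参数:
--         elements: 矿石列表，每个元素为(状态, 魔力)的元组
--         BIT: 最大位数
--
--     返回:
--         long: 最大魔力和
--     """
--     # 按魔力值从大到小排序
--     elements.sort(key=lambda x: x[1], reverse=True)
--
--     # 初始化线性基
--     basis = [0] * (BIT + 1)
--
--     ans = 0
--     # 贪心选择矿石
--     for status, magic in elements:
--         if insert(status, basis, BIT):
--             ans += magic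
--
--     return ans
-- ===== SOURCE B (Python) =====
-- def compute(elements, BIT):
--     """Max magic sum by column-major Gaussian elimination over the whole
--     matrix at once, instead of row-by-row greedy insertion into a basis.
--
--     Like A it sorts `elements` in place (descending magic).  Rows are the
--     statuses reduced to bits 0..BIT; for each bit position h from BIT down
--     to 0 the first not-yet-pivot row with bit h set becomes the pivot of
--     that column and is XOR-eliminated from every other not-yet-pivot row
--     with bit h set.  The pivot rows are exactly the rows that enlarge the
--     span of the rows before them, i.e. the rows A's greedy insert accepts,
--     so summing their magics gives the same answer.
--     """
--     elements.sort(key=lambda x: x[1], reverse=True)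
--     M = (1 << (BIT + 1)) if BIT >= 0 else 1
--     rows = [s % M for s, _ in elements]
--     pivot = [False] * len(rows)
--     for h in range(BIT, -1, -1):
--         p = -1
--         for i in range(len(rows)):
--             if not pivot[i] and (rows[i] >> h) & 1:
--                 p = i
--                 break
--         if p < 0:
--             continue
--         pivot[p] = True
--         pval = rows[p]
--         for j in range(len(rows)):
--             if not pivot[j] and (rows[j] >> h) & 1:
--                 rows[j] ^= pval
--     return sum(e[1] for piv, e in zip(pivot, elements) if piv)
-- ===== Notes on version B (the rewrite author's own statement) =====
-- stated objective: alternative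
-- what changed: Replaces A's row-by-row greedy insertion into an incrementally built linear basis by column-major Gaussian elimination over the whole matrix at once: for each bit position BIT..0 the first unpivoted row with that bit set becomes the column's pivot and is XOR-eliminated from the other unpivoted rows, and the answer is the sum of magics of the pivot rows.
import Mathlib
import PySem

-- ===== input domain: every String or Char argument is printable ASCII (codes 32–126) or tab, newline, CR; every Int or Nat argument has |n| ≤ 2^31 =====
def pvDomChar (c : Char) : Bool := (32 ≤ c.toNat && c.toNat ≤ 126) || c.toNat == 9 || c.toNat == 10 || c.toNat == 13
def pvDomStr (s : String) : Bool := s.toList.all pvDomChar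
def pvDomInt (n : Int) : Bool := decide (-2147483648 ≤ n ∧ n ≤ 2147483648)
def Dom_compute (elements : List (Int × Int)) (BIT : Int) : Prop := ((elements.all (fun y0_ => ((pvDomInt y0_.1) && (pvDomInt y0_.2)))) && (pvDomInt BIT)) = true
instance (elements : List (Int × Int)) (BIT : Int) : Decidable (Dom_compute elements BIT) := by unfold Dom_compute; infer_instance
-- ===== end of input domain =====

-- B replaces A's row-by-row greedy insertion into an incrementally built basis by
-- column-major Gaussian elimination over the whole matrix (one pass per bit position,
-- pivoting and eliminating across all rows); return value only — like A it sorts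
-- `elements` in place (the ports are pure, equivalence is about the returned sum).

-- ===== PORT A =====
-- `for i in range(BIT, -1, -1)` of `insert`: k+1 ↦ index i = k, counting down to 0;
-- basis[i] is in range on every reachable call (0 ≤ i ≤ BIT, len = BIT+1), so getD/set are exact.
def insertGo : Nat → Int → List Int → Bool × List Int
  | 0, _, basis => (false, basis)
  | k+1, num, basis =>
    if PySem.Int.band (num >>> k) 1 ≠ 0 then      -- if (num >> i) & 1:
      if basis.getD k 0 = 0 then (true, basis.set k num)
      else insertGo k (PySem.Int.bxor num (basis.getD k 0)) basis
    else insertGo k num basis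

def compute (elements : List (Int × Int)) (BIT : Int) : Int :=
  let sortedEls := PySem.List.sorted elements (fun x => x.2) true
  let basis : List Int := List.replicate (BIT + 1).toNat 0    -- [0] * (BIT + 1)
  (sortedEls.foldl (fun (st : Int × List Int) el =>
      let r := insertGo (BIT + 1).toNat el.1 st.2             -- insert(status, basis, BIT)
      if r.1 then (st.1 + el.2, r.2) else (st.1, r.2))
    (0, basis)).1

-- ===== PORT B =====
-- the inner `for i in range(len(rows)): ... break` pivot search of Source B, over rows zipped
-- with their pivot flags, carrying the running index i.
def findPiv : List (Int × Bool) → Nat → Nat → Option Nat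
  | [], _, _ => none
  | rb :: t, h, i =>
    if rb.2 = false ∧ PySem.Int.band (rb.1 >>> h) 1 ≠ 0 then some i
    else findPiv t h (i + 1)

-- the inner `for j in range(len(rows))` elimination pass (pivot[p] is already True there,
-- so row p itself is untouched and `pval` is its unchanged value).
def elimRows (rows : List Int) (pivot : List Bool) (h : Nat) (pval : Int) : List Int :=
  (rows.zip pivot).map (fun (rb : Int × Bool) =>
    if rb.2 = false ∧ PySem.Int.band (rb.1 >>> h) 1 ≠ 0 then PySem.Int.bxor rb.1 pval else rb.1)

-- `for h in range(BIT, -1, -1)`: t+1 ↦ column h = t, counting down to 0.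
def colLoop : Nat → List Int → List Bool → List Int × List Bool
  | 0, rows, pivot => (rows, pivot)
  | t+1, rows, pivot =>
    match findPiv (rows.zip pivot) t 0 with
    | none => colLoop t rows pivot
    | some p =>
      let pivot' := pivot.set p true
      colLoop t (elimRows rows pivot' t (rows.getD p 0)) pivot'

def compute_alt (elements : List (Int × Int)) (BIT : Int) : Int :=
  let sortedEls := PySem.List.sorted elements (fun x => x.2) true
  -- M = (1 << (BIT + 1)) if BIT >= 0 else 1  (toNat exact: the shift is taken only for BIT ≥ 0)
  let M : Int := if 0 ≤ BIT then (1 : Int) <<< (BIT + 1).toNat else 1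
  let rows := sortedEls.map (fun e => PySem.Int.mod e.1 M)    -- rows = [s % M for s, _ in elements]
  let pivot : List Bool := List.replicate rows.length false
  let res := colLoop (BIT + 1).toNat rows pivot
  ((res.2.zip sortedEls).foldl (fun a pb => if pb.1 then a + pb.2.2 else a) 0)

-- ===== PRECONDITION & SPEC =====
def Spec_compute (elements : List (Int × Int)) (BIT : Int) (out : Int) : Prop := out = compute_alt elements BIT
instance (elements : List (Int × Int)) (BIT : Int) (out : Int) : Decidable (Spec_compute elements BIT out) := by unfold Spec_compute; infer_instance

-- ===== CLAIM (what is proved, stated in full; the proofs are below) =====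
def Claim_equal_compute : Prop := ∀ (elements : List (Int × Int)) (BIT : Int), Dom_compute elements BIT → Spec_compute elements BIT (compute elements BIT)

-- ===== LEMMAS AND PROOFS =====

-- ---------- generic bit lemmas ----------

lemma band_shift_iff (x : Int) (i : Nat) :
    (PySem.Int.band (x >>> i) 1 ≠ 0) ↔ Int.testBit x i = true := by
  rw [PySem.Int.band_one, PySem.Int.mod_eq_emod_of_pos (by norm_num)]
  cases x with
  | ofNat m =>
    show ¬((Int.ofNat (m >>> i)) % 2 = 0) ↔ _
    rw [Int.testBit, Nat.testBit_eq_decide_div_mod_eq, ← Nat.shiftRight_eq_div_pow]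
    generalize m >>> i = t
    simp only [Int.ofNat_eq_natCast, decide_eq_true_eq]
    omega
  | negSucc m =>
    show ¬((Int.negSucc (m >>> i)) % 2 = 0) ↔ _
    rw [Int.testBit, Nat.testBit_eq_decide_div_mod_eq, ← Nat.shiftRight_eq_div_pow]
    generalize m >>> i = t
    rw [Int.negSucc_eq]
    simp only [Bool.not_eq_true', decide_eq_false_iff_not]
    omega

lemma testBit_bxor (a b : Int) (i : Nat) :
    Int.testBit (PySem.Int.bxor a b) i = xor (Int.testBit a i) (Int.testBit b i) := by
  cases a with
  | ofNat m =>
    cases b with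
    | ofNat n =>
      have hv : PySem.Int.bxor (Int.ofNat m) (Int.ofNat n) = Int.ofNat (m ^^^ n) := by
        simp [PySem.Int.bxor]
      rw [hv]; simp only [Int.testBit]; exact Nat.testBit_xor m n i
    | negSucc n =>
      have hv : PySem.Int.bxor (Int.ofNat m) (Int.negSucc n) = Int.negSucc (m ^^^ n) := by
        simp [PySem.Int.bxor, Int.negSucc_eq]
        rw [if_neg (by omega : ¬((n:Int) ≤ -1))]; ring
      rw [hv]; simp only [Int.testBit]; rw [Nat.testBit_xor]
      cases m.testBit i <;> cases n.testBit i <;> rfl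
  | negSucc m =>
    cases b with
    | ofNat n =>
      have hv : PySem.Int.bxor (Int.negSucc m) (Int.ofNat n) = Int.negSucc (m ^^^ n) := by
        simp [PySem.Int.bxor, Int.negSucc_eq]
        rw [if_neg (by omega : ¬((m:Int) ≤ -1))]; ring
      rw [hv]; simp only [Int.testBit]; rw [Nat.testBit_xor]
      cases m.testBit i <;> cases n.testBit i <;> rfl
    | negSucc n =>
      have hv : PySem.Int.bxor (Int.negSucc m) (Int.negSucc n) = Int.ofNat (m ^^^ n) := by
        simp [PySem.Int.bxor, Int.negSucc_eq]
        rw [if_neg (by omega : ¬((m:Int) ≤ -1))]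
        rw [if_neg (by omega : ¬((n:Int) ≤ -1))]
      rw [hv]; simp only [Int.testBit]; rw [Nat.testBit_xor]
      cases m.testBit i <;> cases n.testBit i <;> rfl

lemma testBit_natCast (n : Nat) (j : Nat) : Int.testBit (n : Int) j = n.testBit j := rfl

lemma int_testBit_eq (x : Int) (j : Nat) :
    Int.testBit x j = decide ((x / ((2:Int)^j)) % 2 = 1) := by
  have hp : ((2:Int)^j) = ((2^j : Nat) : Int) := by push_cast; ring
  cases x with
  | ofNat m =>
    have h : (Int.ofNat m) / ((2:Int)^j) = Int.ofNat (m / 2^j) := by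
      rw [hp]
      have h1 : (Int.ofNat m) >>> j = Int.ofNat (m >>> j) := rfl
      have h2 := Int.shiftRight_eq_div_pow (Int.ofNat m) j
      rw [h1, Nat.shiftRight_eq_div_pow] at h2
      exact h2.symm
    rw [h]; simp only [Int.testBit, Nat.testBit_eq_decide_div_mod_eq]
    generalize m / 2^j = t
    simp only [Int.ofNat_eq_natCast, decide_eq_decide]
    omega
  | negSucc m =>
    have h : (Int.negSucc m) / ((2:Int)^j) = Int.negSucc (m / 2^j) := by
      rw [hp]
      have h1 : (Int.negSucc m) >>> j = Int.negSucc (m >>> j) := rfl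
      have h2 := Int.shiftRight_eq_div_pow (Int.negSucc m) j
      rw [h1, Nat.shiftRight_eq_div_pow] at h2
      exact h2.symm
    rw [h]; simp only [Int.testBit, Nat.testBit_eq_decide_div_mod_eq]
    generalize m / 2^j = t
    rw [Int.negSucc_eq]
    rcases Nat.mod_two_eq_zero_or_one t with h0 | h0 <;> simp [h0] <;> omega

lemma testBit_emod_two_pow (a : Int) (K j : Nat) (hj : j < K) :
    Nat.testBit (a % ((2:Int)^K)).toNat j = Int.testBit a j := by
  have hKpos : (0:Int) < 2^K := by positivity
  set r := a % ((2:Int)^K) with hr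
  have hr0 : 0 ≤ r := Int.emod_nonneg a (by positivity)
  have h1 : Nat.testBit r.toNat j = Int.testBit r j := by
    conv_rhs => rw [← Int.toNat_of_nonneg hr0]
    rw [testBit_natCast]
  rw [h1, int_testBit_eq, int_testBit_eq]
  have hdec : a = r + (2^(K-j) * (a / 2^K)) * 2^j := by
    have h2 : (2:Int)^(K-j) * 2^j = 2^K := by
      rw [← pow_add]; congr 1; omega
    have base := Int.mul_ediv_add_emod a ((2:Int)^K)
    linear_combination -base - hr - (a / 2^K) * h2
  have hdiv : a / ((2:Int)^j) = r / 2^j + 2^(K-j) * (a / 2^K) := by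
    conv_lhs => rw [hdec]
    exact Int.add_mul_ediv_right _ _ (by positivity)
  rw [hdiv]
  have h3 : (2:Int)^(K-j) = 2 * 2^(K-j-1) := by
    rw [← pow_succ']; congr 1; omega
  rw [h3]
  have h4 : r / 2^j + 2 * 2^(K-j-1) * (a / 2^K) = r / 2^j + 2 * (2^(K-j-1) * (a / 2^K)) := by ring
  rw [h4, Int.add_mul_emod_self_left]

lemma nat_lt_of_testBit_false (n j : Nat) (h2 : n < 2^(j+1)) (h : n.testBit j = false) : n < 2^j := by
  rw [Nat.testBit_eq_decide_div_mod_eq] at h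
  have hp : 0 < 2^j := Nat.two_pow_pos j
  have hd2 : n / 2^j < 2 := (Nat.div_lt_iff_lt_mul hp).2 (by rw [pow_succ] at h2; omega)
  simp at h
  have h0 : n / 2^j = 0 := by
    generalize n / 2^j = d at h hd2
    omega
  have := (Nat.div_eq_zero_iff_lt hp).1 h0
  omega

lemma nat_two_pow_le_of_testBit (n j : Nat) (h : n.testBit j = true) : 2^j ≤ n := by
  by_contra hc
  rw [Nat.testBit_lt_two_pow (by omega)] at h
  exact Bool.false_ne_true h

lemma one_shiftLeft_int (n : Nat) : (1 : Int) <<< n = ((2:Int))^n := by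
  have h : (1 : Int) <<< n = Int.ofNat (1 <<< n) := rfl
  rw [h, Nat.one_shiftLeft]
  simp [Int.ofNat_eq_natCast]

lemma bxor_natCast (a b : Nat) : PySem.Int.bxor (a : Int) (b : Int) = ((a ^^^ b : Nat) : Int) := by
  rw [PySem.Int.bxor_of_nonneg (by positivity) (by positivity)]
  simp

-- masked view of an integer: its bits 0..K-1, as a Nat
def mkK (K : Nat) (x : Int) : Nat := (x % ((2:Int)^K)).toNat

lemma mkK_lt (K : Nat) (x : Int) : mkK K x < 2^K := by
  unfold mkK
  have h1 : x % ((2:Int)^K) < 2^K := Int.emod_lt_of_pos x (by positivity)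
  have h2 : ((2^K : Nat) : Int) = (2:Int)^K := by push_cast; ring
  rw [← h2] at h1
  omega

lemma mkK_testBit (K : Nat) (x : Int) (t : Nat) (ht : t < K) :
    (mkK K x).testBit t = Int.testBit x t := testBit_emod_two_pow x K t ht

lemma nat_eq_of_testBit_lt (K x y : Nat) (hx : x < 2^K) (hy : y < 2^K)
    (h : ∀ t, t < K → x.testBit t = y.testBit t) : x = y := by
  apply Nat.eq_of_testBit_eq
  intro t
  by_cases ht : t < K
  · exact h t ht
  · rw [Nat.testBit_lt_two_pow (lt_of_lt_of_le hx (Nat.pow_le_pow_right (by norm_num) (by omega))),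
      Nat.testBit_lt_two_pow (lt_of_lt_of_le hy (Nat.pow_le_pow_right (by norm_num) (by omega)))]

lemma mkK_bxor (K : Nat) (a b : Int) : mkK K (PySem.Int.bxor a b) = mkK K a ^^^ mkK K b := by
  apply nat_eq_of_testBit_lt K _ _ (mkK_lt K _)
    (Nat.xor_lt_two_pow (mkK_lt K a) (mkK_lt K b))
  intro t ht
  rw [mkK_testBit K _ t ht, testBit_bxor, Nat.testBit_xor,
    mkK_testBit K a t ht, mkK_testBit K b t ht]

lemma mkK_zero (K : Nat) : mkK K 0 = 0 := by unfold mkK; simp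

-- ---------- top bit ----------

def TopBit (v h : Nat) : Prop := v.testBit h = true ∧ v < 2^(h+1)

lemma topBit_ne_zero {v h : Nat} (hv : TopBit v h) : v ≠ 0 := by
  intro h0; subst h0
  have h1 := hv.1
  rw [Nat.zero_testBit] at h1
  exact Bool.false_ne_true h1

lemma topBit_unique {v h h' : Nat} (h1 : TopBit v h) (h2 : TopBit v h') : h = h' := by
  by_contra hne
  rcases Nat.lt_or_ge h h' with hlt | hge
  · have := nat_two_pow_le_of_testBit v h' h2.1
    have := h1.2
    have hle : (2:Nat)^(h+1) ≤ 2^h' := Nat.pow_le_pow_right (by norm_num) (by omega)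
    omega
  · have hlt : h' < h := by omega
    have := nat_two_pow_le_of_testBit v h h1.1
    have := h2.2
    have hle : (2:Nat)^(h'+1) ≤ 2^h := Nat.pow_le_pow_right (by norm_num) (by omega)
    omega

lemma topBit_xor {y g v h : Nat} (hy : TopBit y g) (hv : TopBit v h) (hne : g ≠ h) :
    TopBit (y ^^^ v) (max g h) := by
  rcases Nat.lt_or_ge g h with hlt | hge
  · have hmax : max g h = h := by omega
    rw [hmax]
    constructor
    · rw [Nat.testBit_xor, hv.1,
        Nat.testBit_lt_two_pow (lt_of_lt_of_le hy.2 (Nat.pow_le_pow_right (by norm_num) (by omega)))]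
      rfl
    · exact Nat.xor_lt_two_pow (lt_of_lt_of_le hy.2 (Nat.pow_le_pow_right (by norm_num) (by omega))) hv.2
  · have hlt : h < g := by omega
    have hmax : max g h = g := by omega
    rw [hmax]
    constructor
    · rw [Nat.testBit_xor, hy.1,
        Nat.testBit_lt_two_pow (lt_of_lt_of_le hv.2 (Nat.pow_le_pow_right (by norm_num) (by omega)))]
      rfl
    · exact Nat.xor_lt_two_pow hy.2 (lt_of_lt_of_le hv.2 (Nat.pow_le_pow_right (by norm_num) (by omega)))

-- ---------- span of a list of Nat vectors over GF(2) ----------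

def spanL : List Nat → Nat → Prop
  | [], x => x = 0
  | v :: L, x => spanL L x ∨ spanL L (x ^^^ v)

def spanB : List Nat → Nat → Bool
  | [], x => x == 0
  | v :: L, x => spanB L x || spanB L (x ^^^ v)

lemma spanB_iff (L : List Nat) (x : Nat) : spanB L x = true ↔ spanL L x := by
  induction L generalizing x with
  | nil => simp [spanB, spanL]
  | cons v t ih => simp [spanB, spanL, ih]

lemma spanL_zero (L : List Nat) : spanL L 0 := by
  induction L with
  | nil => rfl
  | cons v t ih => exact Or.inl ih

lemma spanL_xor (L : List Nat) (x y : Nat) (hx : spanL L x) (hy : spanL L y) :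
    spanL L (x ^^^ y) := by
  induction L generalizing x y with
  | nil => simp [spanL] at *; subst hx; subst hy; rfl
  | cons v t ih =>
    rcases hx with hx | hx <;> rcases hy with hy | hy
    · exact Or.inl (ih x y hx hy)
    · refine Or.inr ?_
      have := ih x (y ^^^ v) hx hy
      rwa [← Nat.xor_assoc] at this
    · refine Or.inr ?_
      have := ih (x ^^^ v) y hx hy
      rwa [Nat.xor_assoc, Nat.xor_comm v y, ← Nat.xor_assoc] at this
    · refine Or.inl ?_
      have := ih (x ^^^ v) (y ^^^ v) hx hy
      have he : (x ^^^ v) ^^^ (y ^^^ v) = x ^^^ y := by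
        rw [Nat.xor_assoc, Nat.xor_comm v (y ^^^ v), Nat.xor_assoc y v v]
        simp
      rwa [he] at this

lemma spanL_shift (L : List Nat) (c x : Nat) (hc : spanL L c) :
    spanL L (x ^^^ c) ↔ spanL L x := by
  constructor
  · intro h
    have := spanL_xor L (x ^^^ c) c h hc
    rwa [Nat.xor_assoc, Nat.xor_self, Nat.xor_zero] at this
  · intro h
    exact spanL_xor L x c h hc

lemma spanL_mem (L : List Nat) (v : Nat) (hv : v ∈ L) : spanL L v := by
  induction L with
  | nil => cases hv
  | cons w t ih =>
    rcases List.mem_cons.1 hv with h | h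
    · subst h
      exact Or.inr (by rw [Nat.xor_self]; exact spanL_zero t)
    · exact Or.inl (ih h)

lemma spanL_append_one (L : List Nat) (v x : Nat) :
    spanL (L ++ [v]) x ↔ spanL L x ∨ spanL L (x ^^^ v) := by
  induction L generalizing x with
  | nil => simp [spanL]
  | cons w t ih =>
    show spanL (t ++ [v]) x ∨ spanL (t ++ [v]) (x ^^^ w) ↔ _
    rw [ih x, ih (x ^^^ w)]
    show _ ↔ (spanL t x ∨ spanL t (x ^^^ w)) ∨ (spanL t (x ^^^ v) ∨ spanL t ((x ^^^ v) ^^^ w))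
    have he : (x ^^^ w) ^^^ v = (x ^^^ v) ^^^ w := by
      rw [Nat.xor_assoc, Nat.xor_comm w v, ← Nat.xor_assoc]
    rw [he]
    tauto

lemma spanL_append_left (L L' : List Nat) (x : Nat) (h : spanL L x) : spanL (L ++ L') x := by
  induction L' using List.reverseRecOn with
  | nil => simpa using h
  | append_singleton t v ih =>
    rw [← List.append_assoc, spanL_append_one]
    exact Or.inl ih

lemma spanL_take_mono (m : List Nat) (a b : Nat) (hab : a ≤ b) (x : Nat)
    (h : spanL (m.take a) x) : spanL (m.take b) x := by
  have he : m.take b = m.take a ++ (m.drop a).take (b - a) := by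
    conv_lhs => rw [show b = a + (b - a) by omega]
    exact List.take_add ..
  rw [he]
  exact spanL_append_left _ _ _ h

lemma dti : ∀ (L : List Nat) (y g : Nat), TopBit y g →
    (∀ v ∈ L, v = 0 ∨ ∃ h, TopBit v h ∧ h ≠ g) →
    List.Pairwise (fun a b => ∀ h h', TopBit a h → TopBit b h' → h ≠ h') L →
    ¬ spanL L y := by
  intro L
  induction L with
  | nil =>
    intro y g hy htops _ hspan
    exact topBit_ne_zero hy hspan
  | cons v t ih =>
    intro y g hy htops hpw hspan
    have hpw' := (List.pairwise_cons.1 hpw).2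
    have hvt := (List.pairwise_cons.1 hpw).1
    rcases hspan with hspan | hspan
    · exact ih y g hy (fun w hw => htops w (List.mem_cons_of_mem v hw)) hpw' hspan
    · rcases htops v (List.mem_cons_self ..) with hv0 | ⟨h, hvh, hhg⟩
      · subst hv0
        rw [Nat.xor_zero] at hspan
        exact ih y g hy (fun w hw => htops w (List.mem_cons_of_mem _ hw)) hpw' hspan
      · have hy' : TopBit (y ^^^ v) (max g h) := topBit_xor hy hvh (fun he => hhg he.symm)
        refine ih (y ^^^ v) (max g h) hy' ?_ hpw' hspan
        intro w hw
        rcases htops w (List.mem_cons_of_mem v hw) with hw0 | ⟨h', hwh', hh'g⟩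
        · exact Or.inl hw0
        · refine Or.inr ⟨h', hwh', ?_⟩
          rcases max_choice g h with hm | hm <;> rw [hm]
          · exact hh'g
          · exact fun he => (hvt w hw h h' hvh hwh') he.symm


-- ---------- A side: position-indexed span and the semantics of `insert` ----------

def spanP : (Nat → Nat) → Nat → Nat → Prop
  | _, 0, x => x = 0
  | b, k+1, x => spanP b k x ∨ spanP b k (x ^^^ b k)

lemma spanP_zero (b : Nat → Nat) (k : Nat) : spanP b k 0 := by
  induction k with
  | zero => rfl
  | succ k ih => exact Or.inl ih

lemma spanP_lt (b : Nat → Nat) (k : Nat) (hb : ∀ j, j < k → b j = 0 ∨ TopBit (b j) j)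
    (x : Nat) (h : spanP b k x) : x < 2^k := by
  induction k generalizing x with
  | zero => simp [spanP] at h; subst h; positivity
  | succ k ih =>
    have hb' : ∀ j, j < k → b j = 0 ∨ TopBit (b j) j := fun j hj => hb j (by omega)
    have hstep : (2:Nat)^k ≤ 2^(k+1) := Nat.pow_le_pow_right (by norm_num) (by omega)
    rcases h with h | h
    · have := ih hb' x h
      omega
    · have h1 := ih hb' _ h
      rcases hb k (by omega) with h2 | h2
      · rw [h2, Nat.xor_zero] at h1
        omega
      · have h3 := Nat.xor_lt_two_pow (lt_of_lt_of_le h1 hstep) h2.2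
        rwa [Nat.xor_assoc, Nat.xor_self, Nat.xor_zero] at h3

lemma spanP_congr (b b' : Nat → Nat) (k : Nat) (h : ∀ j, j < k → b j = b' j) (x : Nat) :
    spanP b k x ↔ spanP b' k x := by
  induction k generalizing x with
  | zero => rfl
  | succ k ih =>
    have h' : ∀ j, j < k → b j = b' j := fun j hj => h j (by omega)
    show spanP b k x ∨ spanP b k (x ^^^ b k) ↔ spanP b' k x ∨ spanP b' k (x ^^^ b' k)
    rw [ih h', h k (by omega), ih h']

lemma spanP_update (b : Nat → Nat) (K j : Nat) (x' : Nat) (hj : j < K) (hbj : b j = 0) (y : Nat) :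
    spanP (Function.update b j x') K y ↔ (spanP b K y ∨ spanP b K (y ^^^ x')) := by
  induction K generalizing y with
  | zero => omega
  | succ K ih =>
    by_cases hjK : j = K
    · subst hjK
      have hcg : ∀ z, spanP (Function.update b j x') j z ↔ spanP b j z :=
        fun z => spanP_congr _ _ j (fun t ht => Function.update_of_ne (by omega) ..) z
      show spanP (Function.update b j x') j y ∨ spanP (Function.update b j x') j (y ^^^ Function.update b j x' j)
        ↔ (spanP b j y ∨ spanP b j (y ^^^ b j)) ∨ (spanP b j (y ^^^ x') ∨ spanP b j ((y ^^^ x') ^^^ b j))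
      rw [hcg, Function.update_self, hcg, hbj, Nat.xor_zero, Nat.xor_zero]
      tauto
    · have hjK' : j < K := by omega
      show spanP (Function.update b j x') K y ∨ spanP (Function.update b j x') K (y ^^^ Function.update b j x' K)
        ↔ (spanP b K y ∨ spanP b K (y ^^^ b K)) ∨ (spanP b K (y ^^^ x') ∨ spanP b K ((y ^^^ x') ^^^ b K))
      rw [Function.update_of_ne (by omega), ih hjK', ih hjK']
      have he : (y ^^^ b K) ^^^ x' = (y ^^^ x') ^^^ b K := by
        rw [Nat.xor_assoc, Nat.xor_comm (b K) x', ← Nat.xor_assoc]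
      rw [he]
      tauto

lemma spanP_zero_basis (b : Nat → Nat) (k : Nat) (h : ∀ j, j < k → b j = 0) (y : Nat) :
    spanP b k y ↔ y = 0 := by
  induction k generalizing y with
  | zero => rfl
  | succ k ih =>
    have h' : ∀ j, j < k → b j = 0 := fun j hj => h j (by omega)
    show spanP b k y ∨ spanP b k (y ^^^ b k) ↔ y = 0
    rw [h k (by omega), Nat.xor_zero, ih h']
    tauto

-- masked functional view of A's basis list
def bView (K : Nat) (bl : List Int) : Nat → Nat := fun j => mkK K (bl.getD j 0)

def EchRaw (K : Nat) (bl : List Int) : Prop :=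
  ∀ j, j < K → bl.getD j 0 ≠ 0 → TopBit (bView K bl j) j

lemma echV (K : Nat) (bl : List Int) (h : EchRaw K bl) :
    ∀ j, j < K → bView K bl j = 0 ∨ TopBit (bView K bl j) j := by
  intro j hj
  by_cases h0 : bl.getD j 0 = 0
  · left; unfold bView; rw [h0, mkK_zero]
  · exact Or.inr (h j hj h0)

lemma bView_set (K : Nat) (bl : List Int) (hl : bl.length = K) (j : Nat) (hj : j < K) (num : Int) :
    bView K (bl.set j num) = Function.update (bView K bl) j (mkK K num) := by
  funext t
  by_cases ht : t = j
  · subst ht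
    unfold bView
    rw [Function.update_self, List.getD_eq_getElem?_getD, List.getElem?_set_self (by omega)]
    rfl
  · unfold bView
    rw [Function.update_of_ne ht, List.getD_eq_getElem?_getD, List.getElem?_set_ne (by omega),
      ← List.getD_eq_getElem?_getD]

-- the one induction about `insert`: failure means the masked value is in the span of the
-- basis positions below k; success stores one masked-echelon vector at a free position.
lemma insert_main (K : Nat) : ∀ k, k ≤ K → ∀ (num : Int) (bl : List Int),
    bl.length = K → EchRaw K bl → mkK K num < 2^k →
    ((insertGo k num bl).1 = false →
        (insertGo k num bl).2 = bl ∧ spanP (bView K bl) k (mkK K num)) ∧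
    ((insertGo k num bl).1 = true →
        ¬ spanP (bView K bl) k (mkK K num) ∧
        ∃ j num', j < k ∧ bl.getD j 0 = 0 ∧ (insertGo k num bl).2 = bl.set j num' ∧
          TopBit (mkK K num') j ∧ spanP (bView K bl) k (mkK K num ^^^ mkK K num')) := by
  intro k
  induction k with
  | zero =>
    intro _ num bl hl hE hx
    constructor
    · intro _
      refine ⟨rfl, ?_⟩
      have : mkK K num = 0 := by omega
      rw [this]; rfl
    · intro h
      simp [insertGo] at h
  | succ k ih =>
    intro hk num bl hl hE hx
    have hkK : k < K := by omega
    have hEV := echV K bl hE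
    have hEVk : ∀ j, j < k → bView K bl j = 0 ∨ TopBit (bView K bl j) j :=
      fun j hj => hEV j (by omega)
    have hbit : (PySem.Int.band (num >>> k) 1 ≠ 0) ↔ (mkK K num).testBit k = true := by
      rw [band_shift_iff, mkK_testBit K num k hkK]
    by_cases hc : PySem.Int.band (num >>> k) 1 ≠ 0
    · have hbk : (mkK K num).testBit k = true := hbit.1 hc
      have hge : 2^k ≤ mkK K num := nat_two_pow_le_of_testBit _ k hbk
      by_cases hz : bl.getD k 0 = 0
      · -- store: insertGo = (true, bl.set k num)
        have hred : insertGo (k+1) num bl = (true, bl.set k num) := by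
          rw [insertGo, if_pos hc, if_pos hz]
        rw [hred]
        constructor
        · intro h; cases h
        · intro _
          have hvz : bView K bl k = 0 := by unfold bView; rw [hz, mkK_zero]
          constructor
          · intro hsp
            rcases hsp with hsp | hsp
            · have := spanP_lt _ k hEVk _ hsp; omega
            · rw [hvz, Nat.xor_zero] at hsp
              have := spanP_lt _ k hEVk _ hsp; omega
          · refine ⟨k, num, by omega, hz, rfl, ⟨hbk, hx⟩, ?_⟩
            rw [Nat.xor_self]
            exact spanP_zero _ _
      · -- reduce: insertGo = insertGo k (bxor num (bl.getD k 0)) bl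
        have hred : insertGo (k+1) num bl = insertGo k (PySem.Int.bxor num (bl.getD k 0)) bl := by
          rw [insertGo, if_pos hc, if_neg hz]
        have hTop : TopBit (bView K bl k) k := hE k hkK hz
        have hmx : mkK K (PySem.Int.bxor num (bl.getD k 0)) = mkK K num ^^^ bView K bl k :=
          mkK_bxor K num (bl.getD k 0)
        have hxlt : mkK K num ^^^ bView K bl k < 2^k := by
          apply nat_lt_of_testBit_false _ k (Nat.xor_lt_two_pow hx hTop.2)
          rw [Nat.testBit_xor, hbk, hTop.1]
          rfl
        have hne : ∀ y, spanP (bView K bl) (k+1) y ↔ spanP (bView K bl) k (y ^^^ bView K bl k) ∨ spanP (bView K bl) k y := by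
          intro y; exact or_comm
        have hiff : spanP (bView K bl) (k+1) (mkK K num) ↔
            spanP (bView K bl) k (mkK K num ^^^ bView K bl k) := by
          constructor
          · intro hsp
            rcases hsp with hsp | hsp
            · exfalso; have := spanP_lt _ k hEVk _ hsp; omega
            · exact hsp
          · intro hsp; exact Or.inr hsp
        obtain ⟨hF, hT⟩ := ih (by omega) (PySem.Int.bxor num (bl.getD k 0)) bl hl hE (by rw [hmx]; exact hxlt)
        rw [hred]
        constructor
        · intro hfalse
          obtain ⟨h2, hsp⟩ := hF hfalse
          refine ⟨h2, ?_⟩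
          rw [hmx] at hsp
          exact hiff.2 hsp
        · intro htrue
          obtain ⟨hnsp, j, num', hj, hz', heq, hTop', hsp⟩ := hT htrue
          rw [hmx] at hnsp hsp
          refine ⟨fun hh => hnsp (hiff.1 hh), j, num', by omega, hz', heq, hTop', ?_⟩
          refine Or.inr ?_
          have he : (mkK K num ^^^ bView K bl k) ^^^ mkK K num' =
              (mkK K num ^^^ mkK K num') ^^^ bView K bl k := by
            rw [Nat.xor_assoc, Nat.xor_comm (bView K bl k) (mkK K num'), ← Nat.xor_assoc]
          rwa [he] at hsp
    · -- bit clear: skip position k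
      have hbk : (mkK K num).testBit k = false := by
        rcases Bool.eq_false_or_eq_true ((mkK K num).testBit k) with h | h
        · exact absurd (hbit.2 h) hc
        · exact h
      have hred : insertGo (k+1) num bl = insertGo k num bl := by
        rw [insertGo, if_neg hc]
      have hxk : mkK K num < 2^k := nat_lt_of_testBit_false _ k hx hbk
      have hiff : spanP (bView K bl) (k+1) (mkK K num) ↔ spanP (bView K bl) k (mkK K num) := by
        constructor
        · intro hsp
          rcases hsp with hsp | hsp
          · exact hsp
          · rcases hEV k hkK with h0 | hT
            · rwa [h0, Nat.xor_zero] at hsp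
            · exfalso
              have hlt := spanP_lt _ k hEVk _ hsp
              have hb2 : (mkK K num ^^^ bView K bl k).testBit k = true := by
                rw [Nat.testBit_xor, hbk, hT.1]; rfl
              have := nat_two_pow_le_of_testBit _ k hb2
              omega
        · intro hsp; exact Or.inl hsp
      obtain ⟨hF, hT⟩ := ih (by omega) num bl hl hE hxk
      rw [hred]
      constructor
      · intro hfalse
        obtain ⟨h2, hsp⟩ := hF hfalse
        exact ⟨h2, hiff.2 hsp⟩
      · intro htrue
        obtain ⟨hnsp, j, num', hj, hz', heq, hTop', hsp⟩ := hT htrue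
        exact ⟨fun hh => hnsp (hiff.1 hh), j, num', by omega, hz', heq, hTop', Or.inl hsp⟩

-- the specification sum: magic of e counts iff its masked status is outside the span
-- of the masked statuses before it
def specSum (K : Nat) : List Nat → List (Int × Int) → Int
  | _, [] => 0
  | pre, e :: t => (if spanB pre (mkK K e.1) then 0 else e.2) + specSum K (pre ++ [mkK K e.1]) t

lemma A_fold (K : Nat) (rest : List (Int × Int)) : ∀ (pre : List Nat) (ans : Int) (bl : List Int),
    bl.length = K → EchRaw K bl →
    (∀ y, spanP (bView K bl) K y ↔ spanL pre y) →
    (rest.foldl (fun (st : Int × List Int) el =>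
        let r := insertGo K el.1 st.2
        if r.1 then (st.1 + el.2, r.2) else (st.1, r.2)) (ans, bl)).1
      = ans + specSum K pre rest := by
  induction rest with
  | nil => intro pre ans bl _ _ _; simp [specSum]
  | cons e t iht =>
    intro pre ans bl hl hE hspan
    simp only [List.foldl_cons, specSum]
    have hx := mkK_lt K e.1
    obtain ⟨hF, hT⟩ := insert_main K K (le_refl K) e.1 bl hl hE hx
    rcases Bool.eq_false_or_eq_true (insertGo K e.1 bl).1 with hb | hb
    swap
    · obtain ⟨h2, hsp⟩ := hF hb
      have hspL : spanL pre (mkK K e.1) := (hspan _).1 hsp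
      have hBtrue : spanB pre (mkK K e.1) = true := (spanB_iff _ _).2 hspL
      rw [hb]
      simp only [Bool.false_eq_true, if_false, h2, hBtrue, if_true]
      have hspan' : ∀ y, spanP (bView K bl) K y ↔ spanL (pre ++ [mkK K e.1]) y := by
        intro y
        rw [hspan y, spanL_append_one]
        constructor
        · exact Or.inl
        · intro h
          rcases h with h | h
          · exact h
          · have := spanL_xor pre _ _ h hspL
            rwa [Nat.xor_assoc, Nat.xor_self, Nat.xor_zero] at this
      rw [iht (pre ++ [mkK K e.1]) ans bl hl hE hspan']
      ring
    · obtain ⟨hnsp, j, num', hj, hz', heq, hTop', hsp⟩ := hT hb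
      have hnspL : ¬ spanL pre (mkK K e.1) := fun h => hnsp ((hspan _).2 h)
      have hBfalse : spanB pre (mkK K e.1) = false := by
        rcases Bool.eq_false_or_eq_true (spanB pre (mkK K e.1)) with h | h
        · exact absurd ((spanB_iff _ _).1 h) hnspL
        · exact h
      rw [hb]
      simp only [if_true, hBfalse, Bool.false_eq_true, if_false]
      have hl' : (insertGo K e.1 bl).2.length = K := by rw [heq, List.length_set, hl]
      have hview : bView K (insertGo K e.1 bl).2 = Function.update (bView K bl) j (mkK K num') := by
        rw [heq]; exact bView_set K bl hl j hj num'
      have hE' : EchRaw K (insertGo K e.1 bl).2 := by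
        intro j' hj' hz''
        rw [hview]
        by_cases hjj : j' = j
        · subst hjj; rw [Function.update_self]; exact hTop'
        · rw [Function.update_of_ne hjj]
          rw [heq, List.getD_eq_getElem?_getD, List.getElem?_set_ne (fun hh => hjj hh.symm),
            ← List.getD_eq_getElem?_getD] at hz''
          exact hE j' hj' hz''
      have hvz : bView K bl j = 0 := by unfold bView; rw [hz', mkK_zero]
      have hspL2 : spanL pre (mkK K e.1 ^^^ mkK K num') := (hspan _).1 hsp
      have hspan' : ∀ y, spanP (bView K (insertGo K e.1 bl).2) K y ↔
          spanL (pre ++ [mkK K e.1]) y := by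
        intro y
        rw [hview, spanP_update _ K j _ hj hvz, hspan y, hspan (y ^^^ mkK K num'), spanL_append_one]
        have he : y ^^^ mkK K num' = (y ^^^ mkK K e.1) ^^^ (mkK K e.1 ^^^ mkK K num') := by
          rw [Nat.xor_assoc, ← Nat.xor_assoc (mkK K e.1), Nat.xor_self, Nat.zero_xor]
        rw [he, spanL_shift pre _ _ hspL2]
      rw [iht (pre ++ [mkK K e.1]) (ans + e.2) (insertGo K e.1 bl).2 hl' hE' hspan']
      ring

lemma compute_eq_specSum (elements : List (Int × Int)) (BIT : Int) :
    compute elements BIT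
      = specSum (BIT + 1).toNat [] (PySem.List.sorted elements (fun x => x.2) true) := by
  unfold compute
  have h := A_fold (BIT + 1).toNat (PySem.List.sorted elements (fun x => x.2) true) [] 0
    (List.replicate (BIT + 1).toNat 0) (by simp) ?_ ?_
  · rw [h]; ring
  · intro j hj hz
    exfalso
    apply hz
    rw [List.getD_eq_getElem?_getD, List.getElem?_replicate]
    simp [hj]
  · intro y
    rw [spanP_zero_basis]
    · show _ ↔ spanL [] y
      rfl
    · intro j hj
      unfold bView
      rw [List.getD_eq_getElem?_getD, List.getElem?_replicate]
      simp [hj, mkK_zero]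


-- ---------- B side: Nat model of the column-major elimination ----------

def findPivN : List (Nat × Bool) → Nat → Nat → Option Nat
  | [], _, _ => none
  | rb :: t, h, i =>
    if rb.2 = false ∧ rb.1.testBit h = true then some i
    else findPivN t h (i + 1)

def elimN (rows : List Nat) (piv : List Bool) (h pval : Nat) : List Nat :=
  (rows.zip piv).map (fun (rb : Nat × Bool) =>
    if rb.2 = false ∧ rb.1.testBit h = true then rb.1 ^^^ pval else rb.1)

def colLoopN : Nat → List Nat → List Bool → List Nat × List Bool
  | 0, rows, piv => (rows, piv)
  | t+1, rows, piv =>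
    match findPivN (rows.zip piv) t 0 with
    | none => colLoopN t rows piv
    | some p => colLoopN t (elimN rows (piv.set p true) t (rows.getD p 0)) (piv.set p true)

-- getD helpers

lemma getD_map_cast : ∀ (l : List Nat) (j : Nat),
    (l.map (fun (n : Nat) => (n : Int))).getD j 0 = ((l.getD j 0 : Nat) : Int) := by
  intro l
  induction l with
  | nil => intro j; simp
  | cons a t ih =>
    intro j
    cases j with
    | zero => rfl
    | succ j => simpa using ih j

lemma getD_map_mk (K : Nat) : ∀ (l : List (Int × Int)) (j : Nat),
    (l.map (fun e => mkK K e.1)).getD j 0 = mkK K ((l.getD j (0,0)).1) := by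
  intro l
  induction l with
  | nil => intro j; simp [mkK_zero]
  | cons a t ih =>
    intro j
    cases j with
    | zero => rfl
    | succ j => simpa using ih j

lemma zip_getD (rs : List Nat) (pv : List Bool) (j : Nat) (hj : j < rs.length)
    (hl : pv.length = rs.length) :
    (rs.zip pv).getD j (0, true) = (rs.getD j 0, pv.getD j false) := by
  have hlen : (rs.zip pv).length = rs.length := by rw [List.length_zip]; omega
  rw [List.getD_eq_getElem?_getD, List.getElem?_eq_getElem (by omega : j < (rs.zip pv).length)]
  rw [List.getElem_zip]
  rw [List.getD_eq_getElem?_getD, List.getElem?_eq_getElem hj,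
    List.getD_eq_getElem?_getD, List.getElem?_eq_getElem (by omega : j < pv.length)]
  rfl

-- port ↔ model bridge

lemma findPiv_bridge : ∀ (rsN : List Nat) (pv : List Bool) (h s : Nat),
    findPiv ((rsN.map (fun (n : Nat) => (n : Int))).zip pv) h s = findPivN (rsN.zip pv) h s := by
  intro rsN
  induction rsN with
  | nil => intro pv h s; rfl
  | cons a t ih =>
    intro pv h s
    cases pv with
    | nil => rfl
    | cons b pt =>
      have hcond : (b = false ∧ PySem.Int.band (((a : Int)) >>> h) 1 ≠ 0)
          ↔ (b = false ∧ a.testBit h = true) := by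
        rw [band_shift_iff, testBit_natCast]
      show (if b = false ∧ PySem.Int.band (((a : Int)) >>> h) 1 ≠ 0 then some s
            else findPiv ((t.map (fun (n : Nat) => (n : Int))).zip pt) h (s + 1))
          = (if b = false ∧ a.testBit h = true then some s else findPivN (t.zip pt) h (s + 1))
      by_cases hc : b = false ∧ a.testBit h = true
      · rw [if_pos (hcond.mpr hc), if_pos hc]
      · rw [if_neg (fun hh => hc (hcond.mp hh)), if_neg hc]
        exact ih pt h (s + 1)

lemma elim_bridge : ∀ (rsN : List Nat) (pv : List Bool) (h : Nat) (pval : Nat),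
    elimRows (rsN.map (fun (n : Nat) => (n : Int))) pv h ((pval : Nat) : Int)
      = (elimN rsN pv h pval).map (fun (n : Nat) => (n : Int)) := by
  intro rsN
  induction rsN with
  | nil => intro pv h pval; rfl
  | cons a t ih =>
    intro pv h pval
    cases pv with
    | nil => rfl
    | cons b pt =>
      have hcond : (b = false ∧ PySem.Int.band (((a : Int)) >>> h) 1 ≠ 0)
          ↔ (b = false ∧ a.testBit h = true) := by
        rw [band_shift_iff, testBit_natCast]
      show (if b = false ∧ PySem.Int.band (((a : Int)) >>> h) 1 ≠ 0
              then PySem.Int.bxor ((a : Int)) ((pval : Nat) : Int) else ((a : Int)))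
            :: elimRows (t.map (fun (n : Nat) => (n : Int))) pt h ((pval : Nat) : Int)
          = (((if b = false ∧ a.testBit h = true then a ^^^ pval else a) : Nat) : Int)
            :: (elimN t pt h pval).map (fun (n : Nat) => (n : Int))
      by_cases hc : b = false ∧ a.testBit h = true
      · rw [if_pos (hcond.mpr hc), if_pos hc, bxor_natCast, ih pt h pval]
      · rw [if_neg (fun hh => hc (hcond.mp hh)), if_neg hc, ih pt h pval]

lemma colLoop_bridge : ∀ (t : Nat) (rsN : List Nat) (pv : List Bool),
    colLoop t (rsN.map (fun (n : Nat) => (n : Int))) pv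
      = ((colLoopN t rsN pv).1.map (fun (n : Nat) => (n : Int)), (colLoopN t rsN pv).2) := by
  intro t
  induction t with
  | zero => intro rsN pv; rfl
  | succ t ih =>
    intro rsN pv
    simp only [colLoop, colLoopN, findPiv_bridge, getD_map_cast]
    cases hfp : findPivN (rsN.zip pv) t 0 with
    | none => exact ih rsN pv
    | some p => simp only [elim_bridge]; exact ih _ _


-- ---------- correctness of the column elimination ----------

def pCond (rb : Nat × Bool) (h : Nat) : Prop := rb.2 = false ∧ rb.1.testBit h = true

lemma findPivN_none : ∀ (l : List (Nat × Bool)) (h s : Nat),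
    findPivN l h s = none → ∀ j, j < l.length → ¬ pCond (l.getD j (0, true)) h := by
  intro l
  induction l with
  | nil => intro h s _ j hj; simp at hj
  | cons rb t ih =>
    intro h s hn j hj
    by_cases hc : rb.2 = false ∧ rb.1.testBit h = true
    · rw [findPivN, if_pos hc] at hn; cases hn
    · rw [findPivN, if_neg hc] at hn
      cases j with
      | zero => exact hc
      | succ j => exact ih h (s+1) hn j (by simpa using hj)

lemma findPivN_some : ∀ (l : List (Nat × Bool)) (h s p : Nat),
    findPivN l h s = some p →
      s ≤ p ∧ p - s < l.length ∧ pCond (l.getD (p - s) (0, true)) h ∧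
      ∀ j, j < p - s → ¬ pCond (l.getD j (0, true)) h := by
  intro l
  induction l with
  | nil => intro h s p hn; cases hn
  | cons rb t ih =>
    intro h s p hn
    by_cases hc : rb.2 = false ∧ rb.1.testBit h = true
    · rw [findPivN, if_pos hc] at hn
      have hp : p = s := (Option.some.inj hn).symm
      subst hp
      refine ⟨le_refl _, by simp, ?_, ?_⟩
      · simpa using hc
      · intro j hj; omega
    · rw [findPivN, if_neg hc] at hn
      obtain ⟨h1, h2, h3, h4⟩ := ih h (s+1) p hn
      have hps : p - s = (p - (s+1)) + 1 := by omega
      refine ⟨by omega, by simp; omega, ?_, ?_⟩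
      · rw [hps]
        simpa using h3
      · intro j hj
        cases j with
        | zero => exact hc
        | succ j =>
          have : j < p - (s+1) := by omega
          exact fun hx => h4 j this (by simpa using hx)

lemma elimN_length (rows : List Nat) (piv : List Bool) (h pval : Nat)
    (hl : piv.length = rows.length) : (elimN rows piv h pval).length = rows.length := by
  unfold elimN
  rw [List.length_map, List.length_zip]
  omega

lemma elimN_getD : ∀ (rows : List Nat) (piv : List Bool) (h pval j : Nat),
    j < rows.length → piv.length = rows.length →
    (elimN rows piv h pval).getD j 0 =
      if piv.getD j false = false ∧ (rows.getD j 0).testBit h = true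
      then rows.getD j 0 ^^^ pval else rows.getD j 0 := by
  intro rows
  induction rows with
  | nil => intro piv h pval j hj _; simp at hj
  | cons a t ih =>
    intro piv h pval j hj hl
    cases piv with
    | nil => simp at hl
    | cons b pt =>
      cases j with
      | zero => rfl
      | succ j =>
        show (elimN t pt h pval).getD j 0 = _
        exact ih pt h pval j (by simpa using hj) (by simpa using hl)

lemma getD_set_self_bool (pv : List Bool) (p : Nat) (hp : p < pv.length) :
    (pv.set p true).getD p false = true := by
  rw [List.getD_eq_getElem?_getD, List.getElem?_set_self (by omega)]
  rfl

lemma getD_set_ne_bool (pv : List Bool) (p j : Nat) (hj : j ≠ p) :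
    (pv.set p true).getD j false = pv.getD j false := by
  rw [List.getD_eq_getElem?_getD, List.getElem?_set_ne (fun hh => hj hh.symm),
    ← List.getD_eq_getElem?_getD]

lemma take_succ_getD (l : List Nat) (i : Nat) (hi : i < l.length) :
    l.take (i+1) = l.take i ++ [l.getD i 0] := by
  rw [List.take_add_one, List.getElem?_eq_getElem hi, List.getD_eq_getElem?_getD,
    List.getElem?_eq_getElem hi]
  rfl

lemma getD_mem_take (l : List Nat) (p i : Nat) (hp : p < i) (hi : i ≤ l.length) :
    l.getD p 0 ∈ l.take i := by
  have hlt : p < (l.take i).length := by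
    rw [List.length_take]; omega
  have he : (l.take i)[p] = l[p] := List.getElem_take
  have hm := List.getElem_mem hlt
  rw [he] at hm
  rwa [List.getD_eq_getElem?_getD, List.getElem?_eq_getElem (by omega : p < l.length)]

lemma rows_span_iff (rs m : List Nat) (hlen : rs.length = m.length)
    (h2 : ∀ j, j < m.length → spanL (m.take j) (rs.getD j 0 ^^^ m.getD j 0)) :
    ∀ i, i ≤ m.length → ∀ y, spanL (rs.take i) y ↔ spanL (m.take i) y := by
  intro i
  induction i with
  | zero => intro _ y; exact Iff.rfl
  | succ i ih =>
    intro hi y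
    have hi' : i < m.length := by omega
    have hc := h2 i hi'
    have he : y ^^^ rs.getD i 0 = (y ^^^ m.getD i 0) ^^^ (rs.getD i 0 ^^^ m.getD i 0) := by
      rw [Nat.xor_assoc, Nat.xor_comm (m.getD i 0), Nat.xor_assoc, Nat.xor_self, Nat.xor_zero]
    rw [take_succ_getD rs i (by omega), take_succ_getD m i hi',
      spanL_append_one, spanL_append_one, ih (by omega), ih (by omega),
      he, spanL_shift _ _ _ hc]

def BInv (K : Nat) (m : List Nat) (t : Nat) (rs : List Nat) (pv : List Bool) : Prop :=
  rs.length = m.length ∧ pv.length = m.length ∧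
  (∀ i, i < m.length → pv.getD i false = false → rs.getD i 0 < 2^t) ∧
  (∀ i, i < m.length → spanL (m.take i) (rs.getD i 0 ^^^ m.getD i 0)) ∧
  (∀ i, i < m.length → pv.getD i false = true → ∃ h, t ≤ h ∧ h < K ∧ TopBit (rs.getD i 0) h) ∧
  (∀ i j, i < m.length → j < m.length → i ≠ j → pv.getD i false = true → pv.getD j false = true →
     ∀ h h', TopBit (rs.getD i 0) h → TopBit (rs.getD j 0) h' → h ≠ h')

lemma colLoopN_inv (K : Nat) (m : List Nat) : ∀ t, t ≤ K → ∀ rs pv, BInv K m t rs pv →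
    BInv K m 0 (colLoopN t rs pv).1 (colLoopN t rs pv).2 := by
  intro t
  induction t with
  | zero => intro _ rs pv hInv; exact hInv
  | succ t iht =>
    intro htK rs pv hInv
    obtain ⟨hL1, hL2, hI1, hI2, hI3, hI4⟩ := hInv
    have hzl : (rs.zip pv).length = m.length := by rw [List.length_zip]; omega
    simp only [colLoopN]
    cases hfp : findPivN (rs.zip pv) t 0 with
    | none =>
      show BInv K m 0 (colLoopN t rs pv).1 (colLoopN t rs pv).2
      apply iht (by omega)
      refine ⟨hL1, hL2, ?_, hI2, ?_, hI4⟩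
      · intro i hi hpi
        have hnc := findPivN_none _ t 0 hfp i (by omega)
        rw [zip_getD rs pv i (by omega) (by omega)] at hnc
        have hbit : (rs.getD i 0).testBit t = false := by
          rcases Bool.eq_false_or_eq_true ((rs.getD i 0).testBit t) with hb | hb
          · exact absurd ⟨hpi, hb⟩ hnc
          · exact hb
        exact nat_lt_of_testBit_false _ t (hI1 i hi hpi) hbit
      · intro i hi hpi
        obtain ⟨h, hh1, hh2, hh3⟩ := hI3 i hi hpi
        exact ⟨h, by omega, hh2, hh3⟩
    | some p =>
      obtain ⟨-, hplen, hpc, hmin⟩ := findPivN_some _ t 0 p hfp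
      rw [Nat.sub_zero] at hpc hmin
      rw [hzl] at hplen
      rw [zip_getD rs pv p (by omega) (by omega)] at hpc
      obtain ⟨hpvp, hbitp⟩ := hpc
      have hTp : TopBit (rs.getD p 0) t := ⟨hbitp, hI1 p hplen hpvp⟩
      set pv' := pv.set p true with hpv'
      set rs' := elimN rs pv' t (rs.getD p 0) with hrs'
      have hL2' : pv'.length = m.length := by rw [hpv', List.length_set]; omega
      have hL1' : rs'.length = m.length := by
        rw [hrs', elimN_length _ _ _ _ (by omega)]; omega
      have hpv'p : pv'.getD p false = true := getD_set_self_bool pv p (by omega)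
      have hpv'ne : ∀ j, j ≠ p → pv'.getD j false = pv.getD j false :=
        fun j hj => getD_set_ne_bool pv p j hj
      have hrsD : ∀ i, i < m.length → rs'.getD i 0 =
          if pv'.getD i false = false ∧ (rs.getD i 0).testBit t = true
          then rs.getD i 0 ^^^ rs.getD p 0 else rs.getD i 0 := by
        intro i hi
        rw [hrs', elimN_getD rs pv' t (rs.getD p 0) i (by omega) (by omega)]
      have hrs'p : rs'.getD p 0 = rs.getD p 0 := by
        rw [hrsD p hplen, if_neg]
        intro hx
        rw [hpv'p] at hx
        cases hx.1
      have hrs'piv : ∀ i, i < m.length → pv'.getD i false = true → rs'.getD i 0 = rs.getD i 0 := by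
        intro i hi hp1
        rw [hrsD i hi, if_neg]
        intro hx
        rw [hp1] at hx
        cases hx.1
      show BInv K m 0 (colLoopN t rs' pv').1 (colLoopN t rs' pv').2
      apply iht (by omega)
      refine ⟨hL1', hL2', ?_, ?_, ?_, ?_⟩
      · -- (1) unpivoted rows now fit below bit t
        intro i hi hpi
        have hine : i ≠ p := by
          intro he; rw [he, hpv'p] at hpi; cases hpi
        have hpvi : pv.getD i false = false := by rw [← hpv'ne i hine]; exact hpi
        have hlt := hI1 i hi hpvi
        rw [hrsD i hi, hpi]
        by_cases hb : (rs.getD i 0).testBit t = true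
        · rw [if_pos ⟨rfl, hb⟩]
          apply nat_lt_of_testBit_false _ t (Nat.xor_lt_two_pow hlt hTp.2)
          rw [Nat.testBit_xor, hb, hbitp]
          rfl
        · rw [if_neg (fun hx => hb hx.2)]
          exact nat_lt_of_testBit_false _ t hlt (by
            rcases Bool.eq_false_or_eq_true ((rs.getD i 0).testBit t) with h | h
            · exact absurd h hb
            · exact h)
      · -- (2) rows stay congruent to m modulo the span of the earlier m-rows
        intro i hi
        rw [hrsD i hi]
        by_cases hc : pv'.getD i false = false ∧ (rs.getD i 0).testBit t = true
        · rw [if_pos hc]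
          have hine : i ≠ p := by
            intro he; rw [he, hpv'p] at hc; cases hc.1
          have hpvi : pv.getD i false = false := by rw [← hpv'ne i hine]; exact hc.1
          have hpi2 : p < i := by
            rcases Nat.lt_or_ge p i with h | h
            · exact h
            · exfalso
              have hip : i < p := by omega
              have := hmin i hip
              rw [zip_getD rs pv i (by omega) (by omega)] at this
              exact this ⟨hpvi, hc.2⟩
          have e1 := hI2 i hi
          have e2 : spanL (m.take i) (rs.getD p 0 ^^^ m.getD p 0) :=
            spanL_take_mono m p i (by omega) _ (hI2 p hplen)
          have e3 : spanL (m.take i) (m.getD p 0) :=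
            spanL_mem _ _ (getD_mem_take m p i hpi2 (by omega))
          have e4 : spanL (m.take i) (rs.getD p 0) := by
            have := spanL_xor _ _ _ e2 e3
            rwa [Nat.xor_assoc, Nat.xor_self, Nat.xor_zero] at this
          have e5 := spanL_xor _ _ _ e1 e4
          have he : (rs.getD i 0 ^^^ m.getD i 0) ^^^ rs.getD p 0
              = (rs.getD i 0 ^^^ rs.getD p 0) ^^^ m.getD i 0 := by
            rw [Nat.xor_assoc, Nat.xor_comm (m.getD i 0), ← Nat.xor_assoc]
          rwa [he] at e5
        · rw [if_neg hc]
          exact hI2 i hi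
      · -- (5) pivots carry distinct top bits at or above t
        intro i hi hpi
        by_cases hip : i = p
        · subst hip
          rw [hrs'p]
          exact ⟨t, le_refl t, by omega, hTp⟩
        · have hpvi : pv.getD i false = true := by rw [← hpv'ne i hip]; exact hpi
          obtain ⟨h, hh1, hh2, hh3⟩ := hI3 i hi hpvi
          rw [hrs'piv i hi hpi]
          exact ⟨h, by omega, hh2, hh3⟩
      · -- (6) pairwise distinct pivot top bits
        intro i j hi hj hij hpi hpj h h' hti htj
        rw [hrs'piv i hi hpi] at hti
        rw [hrs'piv j hj hpj] at htj
        by_cases hip : i = p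
        · subst hip
          have hpvj : pv.getD j false = true := by rw [← hpv'ne j (Ne.symm hij)]; exact hpj
          have hh : h = t := topBit_unique hti hTp
          obtain ⟨hq, hq1, hq2, hq3⟩ := hI3 j hj hpvj
          have hh' : h' = hq := topBit_unique htj hq3
          omega
        · by_cases hjp : j = p
          · subst hjp
            have hpvi : pv.getD i false = true := by rw [← hpv'ne i hip]; exact hpi
            have hh' : h' = t := topBit_unique htj hTp
            obtain ⟨hq, hq1, hq2, hq3⟩ := hI3 i hi hpvi
            have hh : h = hq := topBit_unique hti hq3
            omega
          · have hpvi : pv.getD i false = true := by rw [← hpv'ne i hip]; exact hpi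
            have hpvj : pv.getD j false = true := by rw [← hpv'ne j hjp]; exact hpj
            exact hI4 i j hi hj hij hpvi hpvj h h' hti htj

lemma accepts_of_inv (K : Nat) (m : List Nat) (rs : List Nat) (pv : List Bool)
    (hInv : BInv K m 0 rs pv) :
    ∀ i, i < m.length → (pv.getD i false = true ↔ spanB (m.take i) (m.getD i 0) = false) := by
  obtain ⟨hL1, hL2, hI1, hI2, hI3, hI4⟩ := hInv
  intro i hi
  have hgd : ∀ j (hj : j < i), (rs.take i)[j]'(by rw [List.length_take]; omega) = rs.getD j 0 := by
    intro j hj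
    rw [List.getElem_take, List.getD_eq_getElem?_getD,
      List.getElem?_eq_getElem (by omega : j < rs.length)]
    rfl
  rcases Bool.eq_false_or_eq_true (pv.getD i false) with hp | hp
  · -- pivot row: its masked status is independent of the earlier ones
    rw [hp]
    obtain ⟨h, -, hhK, hT⟩ := hI3 i hi hp
    have hnsp : ¬ spanL (m.take i) (m.getD i 0) := by
      intro hsp
      have hspr : spanL (m.take i) (rs.getD i 0) := by
        have h2 := hI2 i hi
        have := spanL_xor _ _ _ h2 hsp
        rwa [Nat.xor_assoc, Nat.xor_self, Nat.xor_zero] at this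
      have hsprs : spanL (rs.take i) (rs.getD i 0) :=
        (rows_span_iff rs m hL1 hI2 i (by omega) _).2 hspr
      have htake : (rs.take i).length = i := by
        rw [List.length_take]; omega
      refine dti (rs.take i) (rs.getD i 0) h hT ?_ ?_ hsprs
      · intro v hv
        obtain ⟨j, hjlen, hjv⟩ := List.mem_iff_getElem.1 hv
        have hjlt : j < i := by rw [htake] at hjlen; exact hjlen
        have hvj : v = rs.getD j 0 := by rw [← hjv]; exact hgd j hjlt
        have hjm : j < m.length := by omega
        rcases Bool.eq_false_or_eq_true (pv.getD j false) with hq | hq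
        · right
          obtain ⟨hj2, -, -, hTj⟩ := hI3 j hjm hq
          refine ⟨hj2, by rwa [hvj], ?_⟩
          exact hI4 j i hjm hi (by omega) hq hp hj2 h hTj hT
        · left
          have := hI1 j hjm hq
          omega
      · rw [List.pairwise_iff_getElem]
        intro a b ha hb hab
        rw [htake] at ha hb
        intro ha' hb' hTa hTb
        rw [hgd a (by omega)] at hTa
        rw [hgd b (by omega)] at hTb
        have ham : a < m.length := by omega
        have hbm : b < m.length := by omega
        rcases Bool.eq_false_or_eq_true (pv.getD a false) with hqa | hqa
        · rcases Bool.eq_false_or_eq_true (pv.getD b false) with hqb | hqb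
          · exact hI4 a b ham hbm (by omega) hqa hqb ha' hb' hTa hTb
          · exfalso
            have := hI1 b hbm hqb
            exact topBit_ne_zero hTb (by omega)
        · exfalso
          have := hI1 a ham hqa
          exact topBit_ne_zero hTa (by omega)
    have hB : spanB (m.take i) (m.getD i 0) = false := by
      rcases Bool.eq_false_or_eq_true (spanB (m.take i) (m.getD i 0)) with hq | hq
      · exact absurd ((spanB_iff _ _).1 hq) hnsp
      · exact hq
    rw [hB]
    simp
  · -- unpivoted row: it was eliminated to zero, so its masked status is in the span
    rw [hp]
    have h0 : rs.getD i 0 = 0 := by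
      have := hI1 i hi hp
      omega
    have hsp : spanL (m.take i) (m.getD i 0) := by
      have := hI2 i hi
      rwa [h0, Nat.zero_xor] at this
    have hB : spanB (m.take i) (m.getD i 0) = true := (spanB_iff _ _).2 hsp
    rw [hB]
    simp

lemma sum_bridge (K : Nat) : ∀ (els : List (Int × Int)) (pv : List Bool) (pre : List Nat) (acc : Int),
    pv.length = els.length →
    (∀ i, i < els.length →
       (pv.getD i false = true ↔
        spanB (pre ++ (els.map (fun e => mkK K e.1)).take i) (mkK K ((els.getD i (0,0)).1)) = false)) →
    ((pv.zip els).foldl (fun (a : Int) (pb : Bool × (Int × Int)) =>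
        if pb.1 then a + pb.2.2 else a) acc)
      = acc + specSum K pre els := by
  intro els
  induction els with
  | nil =>
    intro pv pre acc hl _
    have : pv = [] := List.eq_nil_of_length_eq_zero (by simpa using hl)
    subst this
    simp [specSum]
  | cons e tl ih =>
    intro pv pre acc hl hacc
    cases pv with
    | nil => simp at hl
    | cons b pvt =>
      have hb : b = true ↔ spanB pre (mkK K e.1) = false := by
        have := hacc 0 (by simp)
        simpa using this
      have hstep : ((b :: pvt).zip (e :: tl)).foldl (fun (a : Int) (pb : Bool × (Int × Int)) =>
          if pb.1 then a + pb.2.2 else a) acc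
          = (pvt.zip tl).foldl (fun (a : Int) (pb : Bool × (Int × Int)) =>
              if pb.1 then a + pb.2.2 else a) (if b then acc + e.2 else acc) := rfl
      have hshift : ∀ i, i < tl.length →
          (pvt.getD i false = true ↔
           spanB ((pre ++ [mkK K e.1]) ++ (tl.map (fun e => mkK K e.1)).take i)
             (mkK K ((tl.getD i (0,0)).1)) = false) := by
        intro i hi
        have := hacc (i+1) (by simpa using Nat.succ_lt_succ hi)
        rw [List.getD_cons_succ, List.getD_cons_succ] at this
        rwa [show ((e :: tl).map (fun e => mkK K e.1)).take (i+1)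
            = mkK K e.1 :: (tl.map (fun e => mkK K e.1)).take i from rfl,
          List.append_cons] at this
      rw [hstep, ih pvt (pre ++ [mkK K e.1]) _ (by simpa using hl) hshift]
      show _ = acc + ((if spanB pre (mkK K e.1) then 0 else e.2) + specSum K (pre ++ [mkK K e.1]) tl)
      cases b with
      | true =>
        rw [if_pos rfl, hb.1 rfl]
        simp only [Bool.false_eq_true, if_false]
        ring
      | false =>
        have hBt : spanB pre (mkK K e.1) = true := by
          rcases Bool.eq_false_or_eq_true (spanB pre (mkK K e.1)) with hq | hq
          · exact hq
          · exact absurd (hb.2 hq) (by simp)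
        rw [if_neg (by simp), hBt]
        simp only [if_true]
        ring

lemma rows_eq (K : Nat) (els : List (Int × Int)) (M : Int) (hM : M = (2:Int)^K) :
    els.map (fun e => PySem.Int.mod e.1 M)
      = (els.map (fun e => mkK K e.1)).map (fun (n : Nat) => (n : Int)) := by
  subst hM
  rw [List.map_map]
  apply List.map_congr_left
  intro e _
  show PySem.Int.mod e.1 ((2:Int)^K) = ((mkK K e.1 : Nat) : Int)
  rw [PySem.Int.mod_eq_emod_of_pos (by positivity)]
  unfold mkK
  rw [Int.toNat_of_nonneg (Int.emod_nonneg _ (by positivity))]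

lemma B_glue (K : Nat) (els : List (Int × Int)) :
    (((colLoopN K (els.map (fun e => mkK K e.1))
        (List.replicate (els.map (fun e => mkK K e.1)).length false)).2.zip els).foldl
      (fun (a : Int) (pb : Bool × (Int × Int)) => if pb.1 then a + pb.2.2 else a) 0)
      = specSum K [] els := by
  set mN : List Nat := els.map (fun e => mkK K e.1) with hmN
  have hmlen : mN.length = els.length := by rw [hmN, List.length_map]
  have hrepD : ∀ j, (List.replicate mN.length false).getD j false = false := by
    intro j
    by_cases hj : j < mN.length
    · rw [List.getD_eq_getElem?_getD, List.getElem?_replicate, if_pos hj]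
      rfl
    · rw [List.getD_eq_getElem?_getD, List.getElem?_eq_none (by simpa using hj)]
      rfl
  have hInv0 : BInv K mN K mN (List.replicate mN.length false) := by
    refine ⟨rfl, by simp, ?_, ?_, ?_, ?_⟩
    · intro i hi _
      rw [hmN, getD_map_mk]
      exact mkK_lt K _
    · intro i hi
      rw [Nat.xor_self]
      exact spanL_zero _
    · intro i hi hpi
      rw [hrepD i] at hpi
      cases hpi
    · intro i j hi hj hij hpi
      rw [hrepD i] at hpi
      cases hpi
  have hInvF := colLoopN_inv K mN K (le_refl K) mN (List.replicate mN.length false) hInv0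
  have hacc := accepts_of_inv K mN _ _ hInvF
  have hlen2 : (colLoopN K mN (List.replicate mN.length false)).2.length = els.length := by
    rw [hInvF.2.1, hmlen]
  have hhyp : ∀ i, i < els.length →
      ((colLoopN K mN (List.replicate mN.length false)).2.getD i false = true ↔
       spanB ([] ++ (els.map (fun e => mkK K e.1)).take i)
         (mkK K ((els.getD i (0,0)).1)) = false) := by
    intro i hi
    have := hacc i (by omega)
    rw [List.nil_append, ← getD_map_mk K els i, ← hmN]
    exact this
  rw [sum_bridge K els _ [] 0 hlen2 hhyp]
  ring

lemma compute_alt_eq_specSum (elements : List (Int × Int)) (BIT : Int) :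
    compute_alt elements BIT
      = specSum (BIT + 1).toNat [] (PySem.List.sorted elements (fun x => x.2) true) := by
  simp only [compute_alt]
  have hM : (if 0 ≤ BIT then (1 : Int) <<< (BIT + 1).toNat else 1)
      = (2:Int)^((BIT + 1).toNat) := by
    by_cases h0 : 0 ≤ BIT
    · rw [if_pos h0, one_shiftLeft_int]
    · rw [if_neg h0, show (BIT + 1).toNat = 0 by omega]
      norm_num
  rw [rows_eq (BIT + 1).toNat _ _ hM, colLoop_bridge, List.length_map]
  exact B_glue (BIT + 1).toNat (PySem.List.sorted elements (fun x => x.2) true)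

-- ===== VERDICT (by name: the statement is the Claim_ definition above) =====
theorem compute_spec : Claim_equal_compute := by
  intro elements BIT _
  unfold Spec_compute
  rw [compute_eq_specSum, compute_alt_eq_specSum]
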